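-- pv_equiv track=rewrite | github.com/manas-17045/LeetcodeSolutions | Leetcode 3501-3600/3524/3524-1.py | resultArray
-- ===== SOURCE A (Python) =====
-- def resultArray(nums: list[int], k: int) -> list[int]:
--     """
--     Calculates the count of subarrays whose product modulo k equals x, for each x from 0 to k-1.
--
--     Args:
--         nums: A list of integers.
--         k: An integer.
--     Returns:
--         A list of integers, where result[x] is the count of subarrays whose product modulo k is x.
--     """
--     n = len(nums)
--     if k == 1:
--         numSubarrays = n * (n + 1) // 2
--         return [numSubarrays]
--
--     result = [0] * k
--     nonZeroProdSubarrayCount = 0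
--
--     lastZeroIndex = -1
--     for i in range(n + 1):
--         isBoundary = (i == n) or (nums[i] % k == 0)
--
--         if isBoundary:
--             segmentStart = lastZeroIndex + 1
--             segmentEnd = i
--             segmentLen = segmentEnd - segmentStart
--
--             if segmentLen > 0:
--                 nonZeroProdSubarrayCount += segmentLen * (segmentLen + 1) // 2
--
--                 currentEndingCounts = [0] * k
--
--                 for j in range(segmentStart, segmentEnd):
--                     val = nums[j]
--                     vModK = val % k
--
--                     newEndingCounts = [0] * k
--
--                     for p in range(k):
--                         if currentEndingCounts[p] > 0:
--                             productModK = (p * vModK) % k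
--                             newEndingCounts[productModK] += currentEndingCounts[p]
--
--                     newEndingCounts[vModK] += 1
--
--                     currentEndingCounts = newEndingCounts
--
--                     for x in range(k):
--                         result[x] += currentEndingCounts[x]
--
--             lastZeroIndex = i
--
--     totalSubarrays = n * (n + 1) // 2
--     zeroProdSubarrayCount = totalSubarrays - nonZeroProdSubarrayCount
--     result[0] += zeroProdSubarrayCount
--
--     return result
-- ===== SOURCE B (Python) =====
-- def resultArray(nums: list[int], k: int) -> list[int]:
--     result = [0] * k
--     ending = [0] * k  # ending[p] = number of subarrays ending here with product % k == p
--     for num in nums: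
--         v = num % k
--         new = [0] * k
--         for p, c in enumerate(ending):
--             if c:
--                 new[p * v % k] += c
--         new[v] += 1
--         ending = new
--         result = [r + c for r, c in zip(result, ending)]
--     return result
-- ===== Notes on version B (the rewrite author's own statement) =====
-- stated objective: simpler
-- what changed: B drops A's k==1 special case, the zero/non-zero segmentation with boundary scanning and the closed-form count of zero-product subarrays, and instead runs one uniform single-pass DP that carries the product-residue distribution of subarrays ending at each index, accumulating it into the result.
import Mathlib
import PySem

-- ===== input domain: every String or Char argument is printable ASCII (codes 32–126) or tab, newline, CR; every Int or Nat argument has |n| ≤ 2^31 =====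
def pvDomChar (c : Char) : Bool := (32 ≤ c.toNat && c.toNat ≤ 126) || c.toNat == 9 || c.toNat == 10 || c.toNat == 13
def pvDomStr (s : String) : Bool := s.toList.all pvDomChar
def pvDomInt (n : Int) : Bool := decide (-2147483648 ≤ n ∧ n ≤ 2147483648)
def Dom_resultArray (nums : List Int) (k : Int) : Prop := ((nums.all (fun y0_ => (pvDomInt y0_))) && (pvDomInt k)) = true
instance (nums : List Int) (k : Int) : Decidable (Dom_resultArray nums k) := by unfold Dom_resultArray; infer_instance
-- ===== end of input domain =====

-- B replaces A's k==1 special case, zero/non-zero segmentation and closed-form zero-subarray count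
-- by one uniform single-pass residue-distribution DP (objective: simpler; same O(n*k) cost).

-- ===== PORT A =====

-- xs[i] += d   (used by both ports; every use has i < xs.length)
def pvAddAt (l : List Int) (i : Nat) (d : Int) : List Int := l.set i (l.getD i 0 + d)

-- A: one step of the per-segment DP (the 'for p in range(k)' loop plus 'newEndingCounts[vModK] += 1')
def pvStepA (k : Int) (cur : List Int) (val : Int) : List Int :=
  pvAddAt
    ((PySem.List.pyRange 0 k 1).foldl
      (fun ne p =>
        if cur.getD p.toNat 0 > 0 then
          pvAddAt ne (PySem.Int.mod (p * PySem.Int.mod val k) k).toNat (cur.getD p.toNat 0)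
        else ne)
      (List.replicate k.toNat 0))
    (PySem.Int.mod val k).toNat 1

-- A: 'for x in range(k): result[x] += currentEndingCounts[x]'
def pvAccA (k : Int) (res cur : List Int) : List Int :=
  (PySem.List.pyRange 0 k 1).foldl (fun r x => pvAddAt r x.toNat (cur.getD x.toNat 0)) res

-- A: body of the outer 'for i in range(n + 1)' loop; state = (result, nonZeroProdSubarrayCount, lastZeroIndex)
def pvOuterA (k : Int) (nums : List Int) (st : List Int × Int × Int) (i : Int) : List Int × Int × Int :=
  let n : Int := nums.length
  if i == n || PySem.Int.mod (PySem.List.pyGetD nums i 0) k == 0 then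
    let segStart := st.2.2 + 1
    let segLen := i - segStart
    if segLen > 0 then
      let inner :=
        (PySem.List.pyRange segStart i 1).foldl
          (fun (rc : List Int × List Int) j =>
            let cur := pvStepA k rc.2 (PySem.List.pyGetD nums j 0)
            (pvAccA k rc.1 cur, cur))
          (st.1, List.replicate k.toNat 0)
      (inner.1, st.2.1 + PySem.Int.floordiv (segLen * (segLen + 1)) 2, i)
    else (st.1, st.2.1, i)
  else st

def resultArray (nums : List Int) (k : Int) : List Int :=
  let n : Int := nums.length
  if k = 1 then
    [PySem.Int.floordiv (n * (n + 1)) 2]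
  else
    let st := (PySem.List.pyRange 0 (n + 1) 1).foldl (pvOuterA k nums)
      (List.replicate k.toNat 0, 0, -1)
    pvAddAt st.1 0 (PySem.Int.floordiv (n * (n + 1)) 2 - st.2.1)

-- ===== PORT B =====

-- B: ending' from ending and one more element ('for p, c in enumerate(ending): …; new[v] += 1')
def pvStepB (k : Int) (ending : List Int) (num : Int) : List Int :=
  pvAddAt
    ((PySem.List.enumerate ending 0).foldl
      (fun ne pc =>
        if pc.2 ≠ 0 then
          pvAddAt ne (PySem.Int.mod (pc.1 * PySem.Int.mod num k) k).toNat pc.2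
        else ne)
      (List.replicate k.toNat 0))
    (PySem.Int.mod num k).toNat 1

def resultArray_alt (nums : List Int) (k : Int) : List Int :=
  (nums.foldl
    (fun (st : List Int × List Int) num =>
      let e := pvStepB k st.2 num
      ((st.1.zip e).map (fun rc => rc.1 + rc.2), e))
    (List.replicate k.toNat 0, List.replicate k.toNat 0)).1

-- ===== PRECONDITION & SPEC =====

-- Python A raises for k ≤ 0 (ZeroDivisionError on '% 0', or IndexError on 'result[0]'
-- when result = [0]*k is empty); those inputs are excluded.
def Pre_resultArray (nums : List Int) (k : Int) : Prop := 1 ≤ k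
instance (nums : List Int) (k : Int) : Decidable (Pre_resultArray nums k) := by
  unfold Pre_resultArray; infer_instance

def pvWitness_resultArray : List Int × Int := ([2, 0, 3, 6], 4)

def Spec_resultArray (nums : List Int) (k : Int) (out : List Int) : Prop := out = resultArray_alt nums k
instance (nums : List Int) (k : Int) (out : List Int) : Decidable (Spec_resultArray nums k out) := by unfold Spec_resultArray; infer_instance

-- ===== CLAIM (what is proved, stated in full; the proofs are below) =====
def Claim_equal_resultArray : Prop := ∀ (nums : List Int) (k : Int), Dom_resultArray nums k → Pre_resultArray nums k → Spec_resultArray nums k (resultArray nums k)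

-- ===== LEMMAS AND PROOFS =====

-- x * (x + 1) // 2
def pvTri (x : Int) : Int := PySem.Int.floordiv (x * (x + 1)) 2

-- the residue index a mass at position p is sent to by multiplying with v (mod k)
def pvIdx (k v : Int) (p : Nat) : Nat := (PySem.Int.mod ((p : Int) * PySem.Int.mod v k) k).toNat

-- pointwise value of one DP step (both ports step with this same transition)
def pvSum (k v : Int) (cur : List Int) (q : Nat) : Int :=
  ∑ p ∈ Finset.range k.toNat, if q = pvIdx k v p then cur.getD p 0 else 0

-- B's runner, for splitting nums into segments
def pvBrun (k : Int) (st : List Int × List Int) (l : List Int) : List Int × List Int :=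
  l.foldl (fun st num =>
    let e := pvStepB k st.2 num
    ((st.1.zip e).map (fun rc => rc.1 + rc.2), e)) st

theorem pvTri_two (x : Int) : 2 * pvTri x = x * (x + 1) := by
  unfold pvTri
  rw [PySem.Int.floordiv_eq_ediv_of_pos (by norm_num)]
  exact Int.two_mul_ediv_two_of_even (Int.even_mul_succ_self x)
theorem pvTri_split (m L : Int) : pvTri (m + L) = pvTri m + m * L + pvTri L := by
  have h1 := pvTri_two (m + L)
  have h2 := pvTri_two m
  have h3 := pvTri_two L
  nlinarith [h1, h2, h3]
theorem pvTri_succ (x : Int) : pvTri (x + 1) = pvTri x + x + 1 := by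
  have := pvTri_split x 1
  have h1 : pvTri 1 = 1 := by decide
  omega

theorem pvAddAt_length (l : List Int) (i : Nat) (d : Int) : (pvAddAt l i d).length = l.length := by
  simp [pvAddAt]

theorem getD_pvAddAt (l : List Int) {i : Nat} (hi : i < l.length) (d : Int) (q : Nat) :
    (pvAddAt l i d).getD q 0 = (if q = i then d else 0) + l.getD q 0 := by
  unfold pvAddAt
  rcases lt_or_ge q l.length with hq | hq
  · rw [List.getD_eq_getElem _ 0 (by simpa using hq), List.getD_eq_getElem _ 0 hq,
      List.getElem_set]
    split <;> rename_i hqi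
    · rw [List.getD_eq_getElem _ 0 hi]
      simp [← hqi]; ring
    · simp [Ne.symm hqi]
  · rw [List.getD_eq_default _ 0 (by simpa using hq), List.getD_eq_default _ 0 hq]
    have : q ≠ i := by omega
    simp [this]

theorem getD_eq_zero_of_le {l : List Int} {q : Nat} (h : l.length ≤ q) : l.getD q 0 = 0 := by
  rw [List.getD_eq_default]; omega

theorem getD_replicate0 (K q : Nat) : (List.replicate K (0:Int)).getD q 0 = 0 := by
  rcases lt_or_ge q K with h | h
  · rw [List.getD_eq_getElem _ 0 (by simpa using h)]
    simp
  · exact getD_eq_zero_of_le (by simpa using h)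

theorem getD_nonneg {l : List Int} (h : ∀ x ∈ l, 0 ≤ x) (q : Nat) : 0 ≤ l.getD q 0 := by
  rcases lt_or_ge q l.length with hq | hq
  · rw [List.getD_eq_getElem _ 0 hq]
    exact h _ (List.getElem_mem hq)
  · rw [List.getD_eq_default _ 0 (by simpa using hq)]

theorem nonneg_of_getD {l : List Int} (h : ∀ q, 0 ≤ l.getD q 0) : ∀ x ∈ l, 0 ≤ x := by
  intro x hx
  rcases List.getElem_of_mem hx with ⟨q, hq, rfl⟩
  have := h q
  rwa [List.getD_eq_getElem _ 0 hq] at this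

theorem list_eq_of_getD {l1 l2 : List Int} (hlen : l1.length = l2.length)
    (h : ∀ q, l1.getD q 0 = l2.getD q 0) : l1 = l2 := by
  apply List.ext_getElem hlen
  intro q h1 h2
  have := h q
  rwa [List.getD_eq_getElem _ 0 h1, List.getD_eq_getElem _ 0 h2] at this

theorem sum_getD (l : List Int) : l.sum = ∑ q ∈ Finset.range l.length, l.getD q 0 := by
  induction l with
  | nil => simp
  | cons a t ih =>
    rw [List.sum_cons, List.length_cons, Finset.sum_range_succ']
    simp only [List.getD_cons_succ, List.getD_cons_zero]
    omega

-- guarded update loop: length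
theorem foldl_guard_length {ι : Type} (idx : ι → Nat) (wt : ι → Int) (L : List ι) (init : List Int) :
    (L.foldl (fun ne p => if wt p ≠ 0 then pvAddAt ne (idx p) (wt p) else ne) init).length
      = init.length := by
  induction L generalizing init with
  | nil => rfl
  | cons p L ih =>
    rw [List.foldl_cons, ih]
    split <;> simp [pvAddAt_length]

-- guarded update loop: pointwise value
theorem foldl_guard_getD {ι : Type} (idx : ι → Nat) (wt : ι → Int) (L : List ι) (init : List Int)
    (h : ∀ p ∈ L, idx p < init.length) (q : Nat) :
    (L.foldl (fun ne p => if wt p ≠ 0 then pvAddAt ne (idx p) (wt p) else ne) init).getD q 0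
      = init.getD q 0 + (L.map (fun p => if q = idx p then wt p else 0)).sum := by
  induction L generalizing init with
  | nil => simp
  | cons p L ih =>
    rw [List.foldl_cons, List.map_cons, List.sum_cons,
      ih _ (by intro x hx; rw [show (if wt p ≠ 0 then pvAddAt init (idx p) (wt p) else init).length = init.length by split <;> simp [pvAddAt_length]]; exact h x (List.mem_cons_of_mem _ hx))]
    have hstep : (if wt p ≠ 0 then pvAddAt init (idx p) (wt p) else init).getD q 0
        = (if q = idx p then wt p else 0) + init.getD q 0 := by
      by_cases hw : wt p = 0
      · simp [hw]
      · rw [if_pos hw, getD_pvAddAt _ (h p List.mem_cons_self) _ q]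
    rw [hstep]; ring

-- unguarded update loop (A's result accumulation): length and pointwise value
theorem foldl_acc_length {ι : Type} (idx : ι → Nat) (wt : ι → Int) (L : List ι) (init : List Int) :
    (L.foldl (fun ne p => pvAddAt ne (idx p) (wt p)) init).length = init.length := by
  induction L generalizing init with
  | nil => rfl
  | cons p L ih => rw [List.foldl_cons, ih, pvAddAt_length]

theorem foldl_acc_getD {ι : Type} (idx : ι → Nat) (wt : ι → Int) (L : List ι) (init : List Int)
    (h : ∀ p ∈ L, idx p < init.length) (q : Nat) :
    (L.foldl (fun ne p => pvAddAt ne (idx p) (wt p)) init).getD q 0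
      = init.getD q 0 + (L.map (fun p => if q = idx p then wt p else 0)).sum := by
  induction L generalizing init with
  | nil => simp
  | cons p L ih =>
    rw [List.foldl_cons, List.map_cons, List.sum_cons,
      ih _ (by intro x hx; rw [pvAddAt_length]; exact h x (List.mem_cons_of_mem _ hx)),
      getD_pvAddAt _ (h p List.mem_cons_self) _ q]
    ring

theorem pvIdx_lt {k : Int} (hk : 1 ≤ k) (v : Int) (p : Nat) : pvIdx k v p < k.toNat := by
  have h1 := PySem.Int.mod_lt ((p : Int) * PySem.Int.mod v k) (show (0:Int) < k by omega)
  have h2 := PySem.Int.mod_nonneg ((p : Int) * PySem.Int.mod v k) (show (0:Int) < k by omega)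
  unfold pvIdx
  omega
theorem pvIdx_zero {k : Int} (hk : 1 ≤ k) (v : Int) : pvIdx k v 0 = 0 := by
  unfold pvIdx
  rw [show ((0:Nat) : Int) * PySem.Int.mod v k = 0 by push_cast; ring,
    PySem.Int.mod_eq_emod_of_pos (show (0:Int) < k by omega)]
  simp
theorem pvIdx_of_vzero {k v : Int} (hk : 1 ≤ k) (hv : PySem.Int.mod v k = 0) (p : Nat) :
    pvIdx k v p = 0 := by
  unfold pvIdx
  rw [hv, mul_zero, PySem.Int.mod_eq_emod_of_pos (show (0:Int) < k by omega)]
  simp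

theorem pvSum_nonneg {k v : Int} {cur : List Int} (h : ∀ x ∈ cur, 0 ≤ x) (q : Nat) :
    0 ≤ pvSum k v cur q := by
  apply Finset.sum_nonneg
  intro p _
  split
  · exact getD_nonneg h p
  · exact le_refl 0

theorem pvSum_shift {k : Int} (hk : 1 ≤ k) (v : Int) {c e : List Int} (m : Int)
    (h : ∀ p : Nat, e.getD p 0 = c.getD p 0 + (if p = 0 then m else 0)) (q : Nat) :
    pvSum k v e q = pvSum k v c q + (if q = 0 then m else 0) := by
  unfold pvSum
  have hterm : ∀ p ∈ Finset.range k.toNat,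
      (if q = pvIdx k v p then e.getD p 0 else 0)
        = (if q = pvIdx k v p then c.getD p 0 else 0)
          + (if p = 0 then (if q = 0 then m else 0) else 0) := by
    intro p _
    by_cases hp : p = 0
    · subst hp
      rw [pvIdx_zero hk, h 0]
      by_cases hq : q = 0 <;> simp [hq]
    · rw [h p]
      simp [hp]
  rw [Finset.sum_congr rfl hterm, Finset.sum_add_distrib, Finset.sum_ite_eq']
  have h0 : (0 : Nat) ∈ Finset.range k.toNat := by
    simp; omega
  rw [if_pos h0]

theorem sum_pvSum {k : Int} (hk : 1 ≤ k) (v : Int) {cur : List Int}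
    (hlen : cur.length = k.toNat) :
    ∑ q ∈ Finset.range k.toNat, pvSum k v cur q = cur.sum := by
  unfold pvSum
  rw [Finset.sum_comm, sum_getD cur, hlen]
  apply Finset.sum_congr rfl
  intro p _
  rw [Finset.sum_ite_eq', if_pos (by simp [pvIdx_lt hk])]

theorem pvSum_of_vzero {k v : Int} (hk : 1 ≤ k) (hv : PySem.Int.mod v k = 0)
    {cur : List Int} (hlen : cur.length = k.toNat) (q : Nat) :
    pvSum k v cur q = if q = 0 then cur.sum else 0 := by
  unfold pvSum
  have hterm : ∀ p ∈ Finset.range k.toNat,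
      (if q = pvIdx k v p then cur.getD p 0 else 0)
        = (if q = 0 then cur.getD p 0 else 0) := by
    intro p _
    rw [pvIdx_of_vzero hk hv]
  rw [Finset.sum_congr rfl hterm]
  by_cases hq : q = 0
  · rw [if_pos hq, sum_getD cur, hlen]
    apply Finset.sum_congr rfl
    intro p _
    rw [if_pos hq]
  · simp [hq]

theorem stepA_body_eq {k : Int} {cur : List Int} (hcur : ∀ x ∈ cur, 0 ≤ x) (vModK : Int) :
    (fun (ne : List Int) (p : Int) =>
        if cur.getD p.toNat 0 > 0 then
          pvAddAt ne (PySem.Int.mod (p * vModK) k).toNat (cur.getD p.toNat 0)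
        else ne)
      = (fun (ne : List Int) (p : Int) =>
        if cur.getD p.toNat 0 ≠ 0 then
          pvAddAt ne (PySem.Int.mod (p * vModK) k).toNat (cur.getD p.toNat 0)
        else ne) := by
  funext ne p
  have hn := getD_nonneg hcur p.toNat
  by_cases hc : cur.getD p.toNat 0 = 0
  · rw [if_neg (by omega), if_neg (not_not_intro hc)]
  · rw [if_pos (by omega), if_pos hc]

theorem pvStepA_length {k : Int} (hk : 1 ≤ k) {cur : List Int} (hcur : ∀ x ∈ cur, 0 ≤ x)
    (v : Int) : (pvStepA k cur v).length = k.toNat := by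
  unfold pvStepA
  rw [pvAddAt_length, stepA_body_eq hcur, foldl_guard_length
    (fun p : Int => (PySem.Int.mod (p * PySem.Int.mod v k) k).toNat)
    (fun p : Int => cur.getD p.toNat 0), List.length_replicate]

theorem modk_toNat_lt {k : Int} (hk : 1 ≤ k) (a : Int) :
    (PySem.Int.mod a k).toNat < k.toNat := by
  have h1 := PySem.Int.mod_lt a (show (0:Int) < k by omega)
  have h2 := PySem.Int.mod_nonneg a (show (0:Int) < k by omega)
  omega

theorem sum_pyRange_eq_pvSum {k : Int} (hk : 1 ≤ k) (v : Int) (cur : List Int)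
    (wt : Int → Int) (hwt : ∀ p : Nat, wt (p : Int) = cur.getD p 0) (q : Nat) :
    ((PySem.List.pyRange 0 k 1).map
        (fun p => if q = (PySem.Int.mod (p * PySem.Int.mod v k) k).toNat then wt p else 0)).sum
      = pvSum k v cur q := by
  rw [PySem.List.pyRange_one, List.map_map]
  show (∑ p ∈ Finset.range (k - 0).toNat, _) = _
  rw [show (k - (0:Int)).toNat = k.toNat by omega]
  unfold pvSum
  apply Finset.sum_congr rfl
  intro p _
  simp only [Function.comp_apply, zero_add, pvIdx, hwt p, Int.toNat_natCast]
  exact if_congr Iff.rfl rfl rfl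

theorem pvStepA_getD {k : Int} (hk : 1 ≤ k) {cur : List Int} (hcur : ∀ x ∈ cur, 0 ≤ x)
    (v : Int) (q : Nat) :
    (pvStepA k cur v).getD q 0
      = (if q = (PySem.Int.mod v k).toNat then 1 else 0) + pvSum k v cur q := by
  unfold pvStepA
  rw [stepA_body_eq hcur]
  have hlen : ((PySem.List.pyRange 0 k 1).foldl
      (fun ne p => if cur.getD p.toNat 0 ≠ 0 then
        pvAddAt ne (PySem.Int.mod (p * PySem.Int.mod v k) k).toNat (cur.getD p.toNat 0)
      else ne) (List.replicate k.toNat 0)).length = k.toNat := by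
    rw [foldl_guard_length (fun p : Int => (PySem.Int.mod (p * PySem.Int.mod v k) k).toNat)
      (fun p : Int => cur.getD p.toNat 0), List.length_replicate]
  rw [getD_pvAddAt _ (by rw [hlen]; exact modk_toNat_lt hk v) _ q,
    foldl_guard_getD (fun p : Int => (PySem.Int.mod (p * PySem.Int.mod v k) k).toNat)
      (fun p : Int => cur.getD p.toNat 0) _ _
      (by intro p _; rw [List.length_replicate]; exact modk_toNat_lt hk _),
    getD_replicate0,
    sum_pyRange_eq_pvSum hk v cur (fun p => cur.getD p.toNat 0)
      (by intro p; simp) q]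
  ring

theorem pvStepB_length {k : Int} (hk : 1 ≤ k) {ending : List Int}
    (hlen : ending.length = k.toNat) (num : Int) :
    (pvStepB k ending num).length = k.toNat := by
  unfold pvStepB
  rw [pvAddAt_length, foldl_guard_length
    (fun pc : Int × Int => (PySem.Int.mod (pc.1 * PySem.Int.mod num k) k).toNat)
    (fun pc : Int × Int => pc.2), List.length_replicate]

theorem pvStepB_getD {k : Int} (hk : 1 ≤ k) {ending : List Int}
    (hlen : ending.length = k.toNat) (num : Int) (q : Nat) :
    (pvStepB k ending num).getD q 0
      = (if q = (PySem.Int.mod num k).toNat then 1 else 0) + pvSum k num ending q := by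
  unfold pvStepB
  have hfl : ((PySem.List.enumerate ending 0).foldl
      (fun ne pc => if pc.2 ≠ 0 then
        pvAddAt ne (PySem.Int.mod (pc.1 * PySem.Int.mod num k) k).toNat pc.2 else ne)
      (List.replicate k.toNat 0)).length = k.toNat := by
    rw [foldl_guard_length
      (fun pc : Int × Int => (PySem.Int.mod (pc.1 * PySem.Int.mod num k) k).toNat)
      (fun pc : Int × Int => pc.2), List.length_replicate]
  rw [getD_pvAddAt _ (by rw [hfl]; exact modk_toNat_lt hk num) _ q,
    foldl_guard_getD
      (fun pc : Int × Int => (PySem.Int.mod (pc.1 * PySem.Int.mod num k) k).toNat)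
      (fun pc : Int × Int => pc.2) _ _
      (by intro pc _; rw [List.length_replicate]; exact modk_toNat_lt hk _),
    getD_replicate0,
    PySem.List.enumerate_eq_map_pyRange ending 0, List.map_map, PySem.List.len_eq, hlen,
    show ((k.toNat : Int)) = k by omega]
  simp only [Function.comp_def]
  rw [sum_pyRange_eq_pvSum hk num ending (fun j => PySem.List.pyGetD ending j 0)
      (by intro p; exact PySem.List.pyGetD_natCast ending p 0) q]
  ring

theorem pvAccA_length {k : Int} (res cur : List Int) :
    (pvAccA k res cur).length = res.length := by
  unfold pvAccA
  rw [foldl_acc_length (fun x : Int => x.toNat) (fun x : Int => cur.getD x.toNat 0)]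

theorem pvAccA_getD {k : Int} (hk : 1 ≤ k) {res cur : List Int} (hres : res.length = k.toNat)
    (hcur : cur.length = k.toNat) (q : Nat) :
    (pvAccA k res cur).getD q 0 = res.getD q 0 + cur.getD q 0 := by
  unfold pvAccA
  rw [foldl_acc_getD (fun x : Int => x.toNat) (fun x : Int => cur.getD x.toNat 0) _ _
    (by intro x hx
        rcases PySem.List.mem_pyRange_one.mp hx with ⟨h1, h2⟩
        show x.toNat < res.length
        rw [hres]
        omega)]
  rw [PySem.List.pyRange_one, List.map_map]
  simp only [Function.comp_def, zero_add, Int.toNat_natCast]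
  have hsum : ((List.range (k - 0).toNat).map
      (fun p : Nat => if q = p then cur.getD p 0 else 0)).sum
      = ∑ p ∈ Finset.range (k - 0).toNat, if q = p then cur.getD p 0 else 0 := rfl
  rw [hsum, Finset.sum_ite_eq]
  rcases lt_or_ge q k.toNat with hq | hq
  · rw [if_pos (by simp; omega)]
  · rw [if_neg (by simp; omega), getD_eq_zero_of_le (show cur.length ≤ q by omega)]

theorem zipAdd_length (r e : List Int) (h : r.length = e.length) :
    ((r.zip e).map (fun rc => rc.1 + rc.2)).length = r.length := by
  simp [h]

theorem zipAdd_getD (r e : List Int) (h : r.length = e.length) (q : Nat) :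
    ((r.zip e).map (fun rc => rc.1 + rc.2)).getD q 0 = r.getD q 0 + e.getD q 0 := by
  rcases lt_or_ge q r.length with hq | hq
  · rw [List.getD_eq_getElem _ 0 (by simp [h]; omega), List.getD_eq_getElem _ 0 hq,
      List.getD_eq_getElem _ 0 (by omega)]
    simp
  · rw [getD_eq_zero_of_le (by simp [h]; omega), getD_eq_zero_of_le hq,
      getD_eq_zero_of_le (by omega)]
    ring

theorem pvBrun_append (k : Int) (st : List Int × List Int) (l1 l2 : List Int) :
    pvBrun k st (l1 ++ l2) = pvBrun k (pvBrun k st l1) l2 := List.foldl_append ..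

theorem pvBrun_nil (k : Int) (st : List Int × List Int) : pvBrun k st [] = st := rfl

theorem pvBrun_cons (k : Int) (st : List Int × List Int) (v : Int) (l : List Int) :
    pvBrun k st (v :: l)
      = pvBrun k ((st.1.zip (pvStepB k st.2 v)).map (fun rc => rc.1 + rc.2),
          pvStepB k st.2 v) l := rfl

theorem pvAlt_eq (nums : List Int) (k : Int) :
    resultArray_alt nums k
      = (pvBrun k (List.replicate k.toNat 0, List.replicate k.toNat 0) nums).1 := rfl

theorem pvStepA_sum {k : Int} (hk : 1 ≤ k) {cur : List Int} (hcur : ∀ x ∈ cur, 0 ≤ x)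
    (hlen : cur.length = k.toNat) (v : Int) : (pvStepA k cur v).sum = cur.sum + 1 := by
  rw [sum_getD, pvStepA_length hk hcur v,
    Finset.sum_congr rfl (fun q _ => pvStepA_getD hk hcur v q),
    Finset.sum_add_distrib, Finset.sum_ite_eq',
    if_pos (Finset.mem_range.mpr (modk_toNat_lt hk v)), sum_pvSum hk v hlen]
  ring

theorem pvStepA_nonneg {k : Int} (hk : 1 ≤ k) {cur : List Int} (hcur : ∀ x ∈ cur, 0 ≤ x)
    (v : Int) : ∀ x ∈ pvStepA k cur v, 0 ≤ x := by
  apply nonneg_of_getD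
  intro q
  rw [pvStepA_getD hk hcur v q]
  have := pvSum_nonneg (k := k) (v := v) hcur q
  split <;> omega

-- one parallel step (A's segment DP vs B), stated pointwise
theorem seg_par {k : Int} (hk : 1 ≤ k) (seg : List Int) :
    ∀ (curA resA resB endB : List Int) (m off : Int), 0 ≤ m →
    curA.length = k.toNat → resA.length = k.toNat → resB.length = k.toNat →
    endB.length = k.toNat →
    (∀ x ∈ curA, 0 ≤ x) →
    (∀ q : Nat, endB.getD q 0 = curA.getD q 0 + (if q = 0 then m else 0)) →
    (∀ q : Nat, resB.getD q 0 = resA.getD q 0 + (if q = 0 then off else 0)) →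
    (let rc := seg.foldl (fun (rc : List Int × List Int) v =>
        let cur := pvStepA k rc.2 v
        (pvAccA k rc.1 cur, cur)) (resA, curA)
     let bs := pvBrun k (resB, endB) seg
     rc.2.length = k.toNat ∧ rc.1.length = k.toNat ∧ bs.1.length = k.toNat ∧
     bs.2.length = k.toNat ∧ (∀ x ∈ rc.2, 0 ≤ x) ∧
     rc.2.sum = curA.sum + seg.length ∧
     (∀ q : Nat, bs.2.getD q 0 = rc.2.getD q 0 + (if q = 0 then m else 0)) ∧
     (∀ q : Nat, bs.1.getD q 0 = rc.1.getD q 0 + (if q = 0 then off + m * seg.length else 0))) := by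
  induction seg with
  | nil =>
    intro curA resA resB endB m off hm h1 h2 h3 h4 hnn hE hR
    refine ⟨h1, h2, h3, h4, hnn, by simp, hE, ?_⟩
    intro q
    rw [pvBrun_nil, List.foldl_nil]
    rw [hR q]
    simp
  | cons v rest ih =>
    intro curA resA resB endB m off hm h1 h2 h3 h4 hnn hE hR
    dsimp only
    rw [List.foldl_cons, pvBrun_cons]
    dsimp only
    have hc1len : (pvStepA k curA v).length = k.toNat := pvStepA_length hk hnn v
    have he1len : (pvStepB k endB v).length = k.toNat := pvStepB_length hk h4 v
    have hc1nn := pvStepA_nonneg hk hnn v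
    have hE1 : ∀ q : Nat, (pvStepB k endB v).getD q 0
        = (pvStepA k curA v).getD q 0 + (if q = 0 then m else 0) := by
      intro q
      rw [pvStepB_getD hk h4 v q, pvStepA_getD hk hnn v q, pvSum_shift hk v m hE q]
      ring
    have hR1 : ∀ q : Nat, ((resB.zip (pvStepB k endB v)).map (fun rc => rc.1 + rc.2)).getD q 0
        = (pvAccA k resA (pvStepA k curA v)).getD q 0 + (if q = 0 then off + m else 0) := by
      intro q
      rw [zipAdd_getD resB _ (by omega), hR q,
        pvAccA_getD hk h2 hc1len q, hE1 q]
      split <;> ring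
    have hmain := ih (pvStepA k curA v) (pvAccA k resA (pvStepA k curA v))
      ((resB.zip (pvStepB k endB v)).map (fun rc => rc.1 + rc.2)) (pvStepB k endB v)
      m (off + m) hm hc1len (by rw [pvAccA_length, h2])
      (by rw [zipAdd_length _ _ (by omega), h3]) he1len hc1nn hE1 hR1
    refine ⟨hmain.1, hmain.2.1, hmain.2.2.1, hmain.2.2.2.1, hmain.2.2.2.2.1, ?_, hmain.2.2.2.2.2.2.1, ?_⟩
    · rw [hmain.2.2.2.2.2.1, pvStepA_sum hk hnn h1 v]
      simp
      ring
    · intro q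
      rw [hmain.2.2.2.2.2.2.2 q]
      have : off + m + m * (rest.length : Int) = off + m * ((v :: rest).length : Int) := by
        simp
        ring
      rw [this]

-- A's inner index loop is a fold over the segment values
theorem inner_eq_seg {σ : Type} (nums : List Int) (a b : Int) (h0 : 0 ≤ a) (hab : a ≤ b)
    (hb : b ≤ nums.length) (f : σ → Int → σ) (init : σ) :
    (PySem.List.pyRange a b 1).foldl (fun acc j => f acc (PySem.List.pyGetD nums j 0)) init
      = ((nums.drop a.toNat).take (b - a).toNat).foldl f init := by
  rw [PySem.List.foldl_congr_mem _ _
      (fun acc j => f acc (PySem.List.pyGetD (nums.take b.toNat) j 0)) init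
      (by
        intro acc j hj
        rcases PySem.List.mem_pyRange_one.mp hj with ⟨hj1, hj2⟩
        have hj0 : (0 : Int) ≤ j := by omega
        congr 1
        rw [PySem.List.pyGetD_of_nonneg _ _ hj0, PySem.List.pyGetD_of_nonneg _ _ hj0]
        have hjb : j.toNat < b.toNat := by omega
        rw [List.getD, List.getD, List.getElem?_take_of_lt hjb]),
    show PySem.List.pyRange a b 1 = PySem.List.pyRange a ((nums.take b.toNat).length : Int) 1
      from by rw [show (((nums.take b.toNat).length : Nat) : Int) = b from by
        rw [List.length_take]; omega],
    PySem.List.foldl_pyRange_pyGetD' (nums.take b.toNat) 0 f init h0,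
    List.drop_take,
    show b.toNat - a.toNat = (b - a).toNat by omega]

-- processing one maximal non-boundary segment [m, i): A's inner fold vs B's run up to i
theorem seg_done {k : Int} (hk : 1 ≤ k) (nums : List Int) (m i : Nat) (resA : List Int)
    (nz : Int) (hmi : m ≤ i) (hin : i ≤ nums.length) (hlenA : resA.length = k.toNat)
    (hB1len : (pvBrun k (List.replicate k.toNat 0, List.replicate k.toNat 0) (nums.take m)).1.length = k.toNat)
    (hB2len : (pvBrun k (List.replicate k.toNat 0, List.replicate k.toNat 0) (nums.take m)).2.length = k.toNat)
    (hBend : ∀ q : Nat, (pvBrun k (List.replicate k.toNat 0, List.replicate k.toNat 0) (nums.take m)).2.getD q 0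
      = if q = 0 then (m : Int) else 0)
    (hBres : ∀ q : Nat, (pvBrun k (List.replicate k.toNat 0, List.replicate k.toNat 0) (nums.take m)).1.getD q 0
      = resA.getD q 0 + (if q = 0 then pvTri (m : Int) - nz else 0)) :
    (let inner := (PySem.List.pyRange (m : Int) (i : Int) 1).foldl
        (fun (rc : List Int × List Int) j =>
          let cur := pvStepA k rc.2 (PySem.List.pyGetD nums j 0)
          (pvAccA k rc.1 cur, cur)) (resA, List.replicate k.toNat 0)
     let Bi := pvBrun k (List.replicate k.toNat 0, List.replicate k.toNat 0) (nums.take i)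
     inner.1.length = k.toNat ∧ inner.2.length = k.toNat ∧
     Bi.1.length = k.toNat ∧ Bi.2.length = k.toNat ∧
     inner.2.sum = ((i - m : Nat) : Int) ∧
     (∀ q : Nat, Bi.2.getD q 0 = inner.2.getD q 0 + (if q = 0 then (m : Int) else 0)) ∧
     (∀ q : Nat, Bi.1.getD q 0 = inner.1.getD q 0
        + (if q = 0 then pvTri (m : Int) - nz + (m : Int) * ((i - m : Nat) : Int) else 0))) := by
  have hseg : nums.take i = nums.take m ++ (nums.drop m).take (i - m) := by
    conv_lhs => rw [show i = m + (i - m) from by omega]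
    rw [List.take_add]
  have hseglen : ((nums.drop m).take (i - m)).length = i - m := by
    rw [List.length_take, List.length_drop]
    omega
  have hinner : (PySem.List.pyRange (m : Int) (i : Int) 1).foldl
      (fun (rc : List Int × List Int) j =>
        let cur := pvStepA k rc.2 (PySem.List.pyGetD nums j 0)
        (pvAccA k rc.1 cur, cur)) (resA, List.replicate k.toNat 0)
      = ((nums.drop m).take (i - m)).foldl
        (fun (rc : List Int × List Int) v =>
          let cur := pvStepA k rc.2 v
          (pvAccA k rc.1 cur, cur)) (resA, List.replicate k.toNat 0) := by
    rw [inner_eq_seg nums (m : Int) (i : Int) (by positivity) (by exact_mod_cast hmi)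
      (by exact_mod_cast hin)
      (fun (rc : List Int × List Int) v =>
        let cur := pvStepA k rc.2 v
        (pvAccA k rc.1 cur, cur)) (resA, List.replicate k.toNat 0), Int.toNat_natCast,
      show ((i : Int) - (m : Int)).toNat = i - m from by omega]
  have hpar := seg_par hk ((nums.drop m).take (i - m)) (List.replicate k.toNat 0) resA
    (pvBrun k (List.replicate k.toNat 0, List.replicate k.toNat 0) (nums.take m)).1
    (pvBrun k (List.replicate k.toNat 0, List.replicate k.toNat 0) (nums.take m)).2
    (m : Int) (pvTri (m : Int) - nz) (by positivity) (List.length_replicate)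
    hlenA hB1len hB2len
    (by intro x hx; rw [List.eq_of_mem_replicate hx])
    (by intro q; rw [hBend q, getD_replicate0]; ring)
    hBres
  rw [hseglen] at hpar
  dsimp only
  rw [hinner, hseg, pvBrun_append]
  dsimp only at hpar
  refine ⟨hpar.2.1, hpar.1, hpar.2.2.1, hpar.2.2.2.1, ?_, hpar.2.2.2.2.2.2.1, hpar.2.2.2.2.2.2.2⟩
  rw [hpar.2.2.2.2.2.1]
  simp

-- the outer-loop invariant of A, related to B's run on the first m elements
theorem outer_inv {k : Int} (hk : 1 ≤ k) (hk1 : k ≠ 1) (nums : List Int) :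
    ∀ i : Nat, i ≤ nums.length →
    ∃ (m : Nat) (resA : List Int) (nz : Int),
      m ≤ i ∧
      (PySem.List.pyRange 0 (i : Int) 1).foldl (pvOuterA k nums)
          (List.replicate k.toNat 0, 0, -1) = (resA, nz, (m : Int) - 1) ∧
      resA.length = k.toNat ∧
      (pvBrun k (List.replicate k.toNat 0, List.replicate k.toNat 0) (nums.take m)).1.length = k.toNat ∧
      (pvBrun k (List.replicate k.toNat 0, List.replicate k.toNat 0) (nums.take m)).2.length = k.toNat ∧
      (∀ q : Nat, (pvBrun k (List.replicate k.toNat 0, List.replicate k.toNat 0) (nums.take m)).2.getD q 0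
        = if q = 0 then (m : Int) else 0) ∧
      (∀ q : Nat, (pvBrun k (List.replicate k.toNat 0, List.replicate k.toNat 0) (nums.take m)).1.getD q 0
        = resA.getD q 0 + (if q = 0 then pvTri (m : Int) - nz else 0)) := by
  have hK : 0 < k.toNat := by omega
  intro i
  induction i with
  | zero =>
    intro _
    refine ⟨0, List.replicate k.toNat 0, 0, le_refl 0, ?_, List.length_replicate, ?_, ?_, ?_, ?_⟩
    · rw [Nat.cast_zero, PySem.List.pyRange_one_eq_nil (le_refl 0), List.foldl_nil]
      norm_num
    · rw [List.take_zero, pvBrun_nil]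
      exact List.length_replicate
    · rw [List.take_zero, pvBrun_nil]
      exact List.length_replicate
    · intro q
      rw [List.take_zero, pvBrun_nil]
      dsimp only
      rw [getD_replicate0]
      simp
    · intro q
      rw [List.take_zero, pvBrun_nil]
      dsimp only
      rw [getD_replicate0]
      have h0 : pvTri ((0 : Nat) : Int) = 0 := by rw [Nat.cast_zero]; decide
      rw [h0]
      simp
  | succ i ih =>
    intro hle
    have hilen : i < nums.length := by omega
    obtain ⟨m, resA, nz, hmi, hfold, hlenA, hB1, hB2, hBend, hBres⟩ := ih (by omega)
    have hstep : (PySem.List.pyRange 0 ((i + 1 : Nat) : Int) 1).foldl (pvOuterA k nums)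
        (List.replicate k.toNat 0, 0, -1)
        = pvOuterA k nums (resA, nz, (m : Int) - 1) (i : Int) := by
      rw [show (((i + 1 : Nat)) : Int) = (i : Int) + 1 from by push_cast; ring,
        PySem.List.pyRange_one_succ_right (by positivity), List.foldl_append, hfold]
      rfl
    have hne : (((i : Int)) == ((nums.length : Nat) : Int)) = false := by
      rw [beq_eq_false_iff_ne]
      intro hcast
      have : i = nums.length := by exact_mod_cast hcast
      omega
    have htake1 : nums.take (i + 1) = nums.take i ++ [nums[i]] := by
      rw [List.take_succ, List.getElem?_eq_getElem hilen, Option.toList_some]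
    by_cases hz : PySem.Int.mod (PySem.List.pyGetD nums ((i : Int)) 0) k = 0
    case neg =>
      -- not a boundary: A's state is unchanged
      refine ⟨m, resA, nz, by omega, ?_, hlenA, hB1, hB2, hBend, hBres⟩
      rw [hstep]
      unfold pvOuterA
      have hzf : (PySem.Int.mod (PySem.List.pyGetD nums ((i : Int)) 0) k == 0) = false := by
        rw [beq_eq_false_iff_ne]
        exact hz
      simp only [hne, hzf, Bool.or_self, Bool.false_eq_true, if_false]
    case pos =>
      have hx : PySem.Int.mod (nums[i]) k = 0 := by
        rwa [PySem.List.pyGetD_natCast, List.getD_eq_getElem _ 0 hilen] at hz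
      have hcond : ((((i : Int)) == ((nums.length : Nat) : Int))
          || (PySem.Int.mod (PySem.List.pyGetD nums ((i : Int)) 0) k == 0)) = true := by
        rw [hne, hz]
        simp
      by_cases hLm : m < i
      case pos =>
        -- nonempty segment [m, i), then the zero element at i
        have hsd := seg_done hk nums m i resA nz (le_of_lt hLm) (by omega) hlenA hB1 hB2 hBend hBres
        dsimp only at hsd
        obtain ⟨hl1, hl2, hl3, hl4, hsum, hend, hres⟩ := hsd
        set inner := (PySem.List.pyRange (m : Int) (i : Int) 1).foldl
          (fun (rc : List Int × List Int) j =>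
            let cur := pvStepA k rc.2 (PySem.List.pyGetD nums j 0)
            (pvAccA k rc.1 cur, cur)) (resA, List.replicate k.toNat 0) with hinner
        set Bi := pvBrun k (List.replicate k.toNat 0, List.replicate k.toNat 0) (nums.take i) with hBi
        have hBi2sum : Bi.2.sum = (i : Int) := by
          rw [sum_getD, hl4, Finset.sum_congr rfl (fun q _ => hend q), Finset.sum_add_distrib,
            Finset.sum_ite_eq', if_pos (Finset.mem_range.mpr hK),
            show (∑ q ∈ Finset.range k.toNat, inner.2.getD q 0) = inner.2.sum from by
              rw [sum_getD inner.2, hl2], hsum]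
          push_cast [Nat.cast_sub (le_of_lt hLm)]
          ring
        have he2 : ∀ q : Nat, (pvStepB k Bi.2 nums[i]).getD q 0
            = if q = 0 then ((i : Int) + 1) else 0 := by
          intro q
          rw [pvStepB_getD hk hl4 _ q, pvSum_of_vzero hk hx hl4 q, hx, hBi2sum]
          by_cases hq : q = 0 <;> simp [hq] <;> ring
        refine ⟨i + 1, inner.1, nz + pvTri ((i : Int) - (m : Int)), le_refl _, ?_, hl1, ?_, ?_, ?_, ?_⟩
        · rw [hstep]
          unfold pvOuterA
          rw [if_pos hcond]
          dsimp only
          rw [show ((m : Int) - 1 + 1) = (m : Int) from by ring]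
          rw [if_pos (show (0 : Int) < (i : Int) - (m : Int) from by omega), ← hinner]
          simp only [Prod.mk.injEq, true_and, and_true, eq_self_iff_true]
          constructor
          · rfl
          · push_cast
            ring
        · rw [htake1, pvBrun_append, pvBrun_cons, pvBrun_nil, ← hBi]
          dsimp only
          rw [zipAdd_length Bi.1 (pvStepB k Bi.2 nums[i])
            (by rw [hl3, pvStepB_length hk hl4]), hl3]
        · rw [htake1, pvBrun_append, pvBrun_cons, pvBrun_nil, ← hBi]
          exact pvStepB_length hk hl4 _
        · intro q
          rw [htake1, pvBrun_append, pvBrun_cons, pvBrun_nil, ← hBi]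
          dsimp only
          rw [he2 q]
          push_cast
          rfl
        · intro q
          rw [htake1, pvBrun_append, pvBrun_cons, pvBrun_nil, ← hBi]
          dsimp only
          rw [zipAdd_getD _ _ (by simp [hl3, pvStepB_length hk hl4]) q, hres q, he2 q]
          have hiden : pvTri ((i : Int) + 1)
              = pvTri (m : Int) + (m : Int) * ((i : Int) - (m : Int))
                + pvTri ((i : Int) - (m : Int)) + ((i : Int) + 1) := by
            have h1 := pvTri_split (m : Int) ((i : Int) - (m : Int))
            have h2 := pvTri_succ (i : Int)
            rw [show (m : Int) + ((i : Int) - (m : Int)) = (i : Int) from by ring] at h1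
            linarith
          have hc : (((i - m : Nat)) : Int) = (i : Int) - (m : Int) :=
            by push_cast [Nat.cast_sub (le_of_lt hLm)]; ring
          rw [hc] at *
          push_cast
          by_cases hq : q = 0 <;> simp [hq] <;> linarith
      case neg =>
        -- empty segment: i itself is the boundary right after the previous one
        have hmeq : m = i := by omega
        subst hmeq
        set Bm := pvBrun k (List.replicate k.toNat 0, List.replicate k.toNat 0) (nums.take m) with hBm
        have hBm2sum : (pvBrun k (List.replicate k.toNat 0, List.replicate k.toNat 0) (nums.take m)).2.sum
            = (m : Int) := by
          rw [sum_getD, hB2, Finset.sum_congr rfl (fun q _ => hBend q),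
            Finset.sum_ite_eq', if_pos (Finset.mem_range.mpr hK)]
        have he2 : ∀ q : Nat, (pvStepB k (pvBrun k (List.replicate k.toNat 0, List.replicate k.toNat 0) (nums.take m)).2 nums[m]).getD q 0
            = if q = 0 then ((m : Int) + 1) else 0 := by
          intro q
          rw [pvStepB_getD hk hB2 _ q, pvSum_of_vzero hk hx hB2 q, hx, hBm2sum]
          by_cases hq : q = 0 <;> simp [hq] <;> ring
        refine ⟨m + 1, resA, nz, le_refl _, ?_, hlenA, ?_, ?_, ?_, ?_⟩
        · rw [hstep]
          unfold pvOuterA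
          rw [if_pos hcond]
          dsimp only
          rw [if_neg (show ¬((0:Int) < (m : Int) - ((m : Int) - 1 + 1)) from by omega)]
          simp only [Prod.mk.injEq, true_and, and_true, eq_self_iff_true]
          push_cast
          ring
        · rw [htake1, pvBrun_append, pvBrun_cons, pvBrun_nil]
          dsimp only
          rw [zipAdd_length Bm.1 (pvStepB k Bm.2 nums[m])
            (by rw [hB1, pvStepB_length hk hB2]), hB1]
        · rw [htake1, pvBrun_append, pvBrun_cons, pvBrun_nil]
          exact pvStepB_length hk hB2 _
        · intro q
          rw [htake1, pvBrun_append, pvBrun_cons, pvBrun_nil]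
          dsimp only
          rw [he2 q]
          push_cast
          rfl
        · intro q
          rw [htake1, pvBrun_append, pvBrun_cons, pvBrun_nil]
          dsimp only
          rw [zipAdd_getD Bm.1 (pvStepB k Bm.2 nums[m])
            (by rw [hB1, pvStepB_length hk hB2]) q, hBres q, he2 q]
          have h2 := pvTri_succ (m : Int)
          push_cast
          by_cases hq : q = 0 <;> simp [hq] <;> linarith

theorem pvStepB_one (j num : Int) : pvStepB 1 [j] num = [j + 1] := by
  have hm : PySem.Int.mod num 1 = 0 := by
    rw [PySem.Int.mod_eq_emod_of_pos one_pos, Int.emod_one]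
  have hm0 : PySem.Int.mod 0 1 = 0 := by
    rw [PySem.Int.mod_eq_emod_of_pos one_pos, Int.emod_one]
  have henum : PySem.List.enumerate [j] 0 = [((0 : Int), j)] := rfl
  unfold pvStepB
  rw [henum, hm, List.foldl_cons, List.foldl_nil]
  by_cases hj : j = 0
  · rw [if_neg (by simpa using hj)]
    simp [pvAddAt, hj]
  · rw [if_pos (by simpa using hj)]
    simp only [mul_zero, hm0]
    simp [pvAddAt]

theorem brun_one (l : List Int) : ∀ (t j : Int),
    pvBrun 1 ([t], [j]) l = ([t + l.length * j + pvTri l.length], [j + l.length]) := by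
  induction l with
  | nil =>
    intro t j
    rw [pvBrun_nil]
    have h0 : pvTri 0 = 0 := by decide
    simp [h0]
  | cons v rest ih =>
    intro t j
    rw [pvBrun_cons]
    dsimp only
    rw [pvStepB_one]
    have hz : (([t].zip [j + 1]).map (fun rc => rc.1 + rc.2)) = [t + (j + 1)] := rfl
    rw [hz, ih]
    have e1 : t + (j + 1) + (rest.length : Int) * (j + 1) + pvTri (rest.length : Int)
        = t + ((rest.length : Int) + 1) * j + pvTri ((rest.length : Int) + 1) := by
      rw [pvTri_succ]
      ring
    have e2 : j + 1 + (rest.length : Int) = j + ((rest.length : Int) + 1) := by ring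
    simp only [List.length_cons]
    push_cast
    rw [e1, e2]

theorem main_eq (nums : List Int) (k : Int) (hk : 1 ≤ k) :
    resultArray nums k = resultArray_alt nums k := by
  by_cases hk1 : k = 1
  · subst hk1
    rw [pvAlt_eq]
    have h1 : List.replicate (1 : Int).toNat (0 : Int) = [0] := rfl
    rw [h1, brun_one]
    unfold resultArray
    rw [if_pos rfl]
    norm_num [pvTri]
  · have hK : 0 < k.toNat := by omega
    obtain ⟨m, resA, nz, hmn, hfold, hlenA, hB1, hB2, hBend, hBres⟩ :=
      outer_inv hk hk1 nums nums.length (le_refl _)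
    unfold resultArray
    rw [if_neg hk1]
    have hstep : (PySem.List.pyRange 0 ((nums.length : Int) + 1) 1).foldl (pvOuterA k nums)
        (List.replicate k.toNat 0, 0, -1)
        = pvOuterA k nums (resA, nz, (m : Int) - 1) ((nums.length : Nat) : Int) := by
      rw [PySem.List.pyRange_one_succ_right (by positivity), List.foldl_append, hfold]
      rfl
    rw [hstep]
    unfold pvOuterA
    rw [if_pos (by simp)]
    dsimp only
    rw [show ((m : Int) - 1 + 1) = (m : Int) from by ring, pvAlt_eq]
    by_cases hLm : m < nums.length
    case pos =>
      have hsd := seg_done hk nums m nums.length resA nz (le_of_lt hLm) (le_refl _)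
        hlenA hB1 hB2 hBend hBres
      rw [List.take_length] at hsd
      dsimp only at hsd
      obtain ⟨hl1, hl2, hl3, hl4, hsum, hend, hres⟩ := hsd
      rw [if_pos (show (0 : Int) < (nums.length : Int) - (m : Int) from by omega)]
      dsimp only
      apply list_eq_of_getD
      · rw [pvAddAt_length, hl1, hl3]
      · intro q
        rw [getD_pvAddAt _ (by rw [hl1]; omega) _ q, hres q]
        have hiden := pvTri_split (m : Int) ((nums.length : Int) - (m : Int))
        rw [show (m : Int) + ((nums.length : Int) - (m : Int)) = (nums.length : Int) from by ring]
          at hiden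
        have hc : (((nums.length - m : Nat)) : Int) = (nums.length : Int) - (m : Int) := by
          push_cast [Nat.cast_sub (le_of_lt hLm)]
          ring
        rw [hc] at *
        have htri1 : PySem.Int.floordiv ((nums.length : Int) * ((nums.length : Int) + 1)) 2
            = pvTri (nums.length : Int) := rfl
        have htri2 : PySem.Int.floordiv (((nums.length : Int) - (m : Int))
            * (((nums.length : Int) - (m : Int)) + 1)) 2
            = pvTri ((nums.length : Int) - (m : Int)) := rfl
        rw [htri1, htri2]
        by_cases hq : q = 0 <;> simp [hq] <;> linarith
    case neg =>
      have hmeq : m = nums.length := by omega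
      subst hmeq
      rw [List.take_length] at hB1 hB2 hBend hBres
      rw [if_neg (show ¬((0:Int) < (nums.length : Int) - (nums.length : Int)) from by omega)]
      dsimp only
      apply list_eq_of_getD
      · rw [pvAddAt_length, hlenA, hB1]
      · intro q
        rw [getD_pvAddAt _ (by rw [hlenA]; omega) _ q, hBres q]
        have htri1 : PySem.Int.floordiv ((nums.length : Int) * ((nums.length : Int) + 1)) 2
            = pvTri (nums.length : Int) := rfl
        rw [htri1]
        by_cases hq : q = 0 <;> simp [hq] <;> ring

-- ===== VERDICT (by name: the statement is the Claim_ definition above) =====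
theorem resultArray_spec : Claim_equal_resultArray := by
  intro nums k _ hpre
  unfold Spec_resultArray
  exact main_eq nums k hpre
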